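-- pv_equiv track=rewrite | github.com/NicoDeGiacomo/advent-of-code | 2025/2b.py | does_repeat
-- ===== SOURCE A (Python) =====
-- def does_repeat(number, pattern):
--     if len(pattern) == 0:
--         return False
--
--     if len(number) % len(pattern) != 0:
--         return False
--
--     for i in range(len(number)):
--         if number[i] != pattern[i % len(pattern)]:
--             return False
--     return True
-- ===== SOURCE B (Python) =====
-- def does_repeat(number, pattern):
--     if len(pattern) == 0:
--         return False
--     if len(number) % len(pattern) != 0:
--         return False
--     return number == pattern * (len(number) // len(pattern))
-- ===== Notes on version B (the rewrite author's own statement) =====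
-- stated objective: simpler
-- what changed: Replaced the index loop with modular indexing by tiling the pattern len(number)//len(pattern) times and comparing the whole sequence at once.
import Mathlib
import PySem

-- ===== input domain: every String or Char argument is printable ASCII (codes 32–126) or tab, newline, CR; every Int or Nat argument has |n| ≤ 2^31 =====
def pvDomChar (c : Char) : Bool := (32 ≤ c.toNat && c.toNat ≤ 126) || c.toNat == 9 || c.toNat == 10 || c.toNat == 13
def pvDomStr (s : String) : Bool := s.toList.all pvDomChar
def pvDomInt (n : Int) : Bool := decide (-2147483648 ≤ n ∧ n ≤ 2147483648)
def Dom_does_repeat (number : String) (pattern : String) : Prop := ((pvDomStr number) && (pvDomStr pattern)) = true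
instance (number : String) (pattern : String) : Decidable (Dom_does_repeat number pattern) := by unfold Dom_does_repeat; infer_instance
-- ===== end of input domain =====

-- B replaces A's index loop with modular indexing by a single tiled-sequence comparison; objective: simpler.

-- ===== PORT A =====
-- the 'for i in range(len(number))' loop with its early 'return False'
def doesRepeatLoop (num pat : List Char) (i : Nat) : Bool :=
  if i < num.length then
    if num.getD i ' ' ≠ pat.getD (i % pat.length) ' ' then false
    else doesRepeatLoop num pat (i + 1)
  else true
termination_by num.length - i

def does_repeat (number : String) (pattern : String) : Bool :=
  if pattern.toList.length = 0 then false
  else if number.toList.length % pattern.toList.length ≠ 0 then false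
  else doesRepeatLoop number.toList pattern.toList 0

-- ===== PORT B =====
def does_repeat_alt (number : String) (pattern : String) : Bool :=
  if pattern.toList.length = 0 then false
  else if number.toList.length % pattern.toList.length ≠ 0 then false
  else number.toList == List.flatten (List.replicate (number.toList.length / pattern.toList.length) pattern.toList)

-- ===== PRECONDITION & SPEC =====
def Spec_does_repeat (number : String) (pattern : String) (out : Bool) : Prop := out = does_repeat_alt number pattern
instance (number : String) (pattern : String) (out : Bool) : Decidable (Spec_does_repeat number pattern out) := by unfold Spec_does_repeat; infer_instance

-- ===== CLAIM (what is proved, stated in full; the proofs are below) =====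
def Claim_equal_does_repeat : Prop := ∀ (number : String) (pattern : String), Dom_does_repeat number pattern → Spec_does_repeat number pattern (does_repeat number pattern)

-- ===== LEMMAS AND PROOFS =====

theorem loop_iff_fuel (num pat : List Char) :
    ∀ (d i : Nat), num.length ≤ i + d →
      (doesRepeatLoop num pat i = true ↔
        ∀ j, i ≤ j → j < num.length → num.getD j ' ' = pat.getD (j % pat.length) ' ') := by
  intro d
  induction d with
  | zero =>
    intro i hi
    rw [doesRepeatLoop]
    have h : ¬ i < num.length := by omega
    simp only [h, if_false]
    constructor
    · intro _ j _ hj; omega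
    · intro _; trivial
  | succ d ih =>
    intro i hi
    rw [doesRepeatLoop]
    by_cases h : i < num.length
    · simp only [h, if_true]
      by_cases hc : num.getD i ' ' = pat.getD (i % pat.length) ' '
      · simp only [hc, ne_eq, not_true_eq_false, if_false]
        rw [ih (i + 1) (by omega)]
        constructor
        · intro hall j hij hj
          rcases Nat.eq_or_lt_of_le hij with rfl | hlt
          · exact hc
          · exact hall j hlt hj
        · intro hall j hij hj
          exact hall j (by omega) hj
      · simp only [hc, ne_eq, not_false_eq_true, if_true]
        constructor
        · intro hfalse; exact absurd hfalse (by simp)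
        · intro hall; exact absurd (hall i le_rfl h) hc
    · simp only [h, if_false]
      constructor
      · intro _ j _ hj; omega
      · intro _; trivial

theorem loop_iff (num pat : List Char) (i : Nat) :
    doesRepeatLoop num pat i = true ↔
      ∀ j, i ≤ j → j < num.length → num.getD j ' ' = pat.getD (j % pat.length) ' ' :=
  loop_iff_fuel num pat num.length i (by omega)

theorem length_flatten_replicate (pat : List Char) (k : Nat) :
    (List.flatten (List.replicate k pat)).length = k * pat.length := by
  induction k with
  | zero => simp
  | succ k ih => simp [List.replicate_succ, ih, Nat.succ_mul]; ring

theorem getD_flatten_replicate (pat : List Char) (k : Nat) :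
    ∀ j, j < k * pat.length →
      (List.flatten (List.replicate k pat)).getD j ' ' = pat.getD (j % pat.length) ' ' := by
  induction k with
  | zero => intro j hj; simp at hj
  | succ k ih =>
    intro j hj
    rw [Nat.succ_mul] at hj
    rw [List.replicate_succ, List.flatten_cons]
    by_cases h : j < pat.length
    · rw [List.getD_append _ _ _ _ h, Nat.mod_eq_of_lt h]
    · have hple : pat.length ≤ j := le_of_not_gt h
      rw [List.getD_append_right _ _ _ _ hple, Nat.mod_eq_sub_mod hple]
      exact ih (j - pat.length) (by omega)

theorem main_eq (num pat : List Char) (_hp : pat.length ≠ 0) (hd : num.length % pat.length = 0) :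
    doesRepeatLoop num pat 0 = (num == List.flatten (List.replicate (num.length / pat.length) pat)) := by
  have hk : (num.length / pat.length) * pat.length = num.length :=
    Nat.div_mul_cancel (Nat.dvd_of_mod_eq_zero hd)
  have hlen : (List.flatten (List.replicate (num.length / pat.length) pat)).length = num.length := by
    rw [length_flatten_replicate, hk]
  rcases hb : (num == List.flatten (List.replicate (num.length / pat.length) pat)) with _ | _
  · -- lists differ: loop must return false
    rw [beq_eq_false_iff_ne] at hb
    by_contra hcontra
    have hloop : doesRepeatLoop num pat 0 = true := by
      cases hval : doesRepeatLoop num pat 0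
      · exact absurd hval hcontra
      · rfl
    apply hb
    apply List.ext_getElem (by omega)
    intro j hj _
    have := (loop_iff num pat 0).mp hloop j (Nat.zero_le j) hj
    have hjk : j < (num.length / pat.length) * pat.length := by rw [hk]; omega
    have h2 := getD_flatten_replicate pat (num.length / pat.length) j hjk
    rw [List.getD_eq_getElem _ _ hj] at this
    rw [List.getD_eq_getElem _ _ (by omega)] at h2
    rw [this, ← h2]
  · -- lists equal: loop returns true
    rw [beq_iff_eq] at hb
    apply (loop_iff num pat 0).mpr
    intro j _ hj
    have hjk : j < (num.length / pat.length) * pat.length := by rw [hk]; omega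
    have h2 := getD_flatten_replicate pat (num.length / pat.length) j hjk
    rw [hb]; exact h2

-- ===== VERDICT (by name: the statement is the Claim_ definition above) =====
theorem does_repeat_spec : Claim_equal_does_repeat := by
  intro number pattern _
  unfold Spec_does_repeat does_repeat does_repeat_alt
  split_ifs with h1 h2
  · rfl
  · rfl
  · exact main_eq _ _ h1 (by omega)
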